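-- pv_equiv track=rewrite | github.com/NeedtoLearn/codejam | road_signs.py | find_valid_sets
-- ===== SOURCE A (Python) =====
-- def is_valid(signs):
--     # Fix M of first sign
--     M = signs[0][0] + signs[0][1]
--     other_signs = list(filter(lambda sign: sign[0] + sign[1] != M, signs))
--     if not other_signs:
--         return True
--     N = other_signs[0][0] - other_signs[0][2]
--     other_signs = list(filter(lambda sign: sign[0] - sign[2] != N, other_signs))
--     if not other_signs:
--         return True
--     # Fix N of first sign
--     N = signs[0][0] - signs[0][2]
--     other_signs = list(filter(lambda sign: sign[0] - sign[2] != N, signs))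
--     if not other_signs:
--         return True
--     M = other_signs[0][0] + other_signs[0][1]
--     other_signs = list(filter(lambda sign: sign[0] + sign[1] != M, other_signs))
--     if not other_signs:
--         return True
--     return False
--
-- def find_valid_sets(S, signs):
--     """ Time Complexity: O(S^3) """
--     for s in reversed(range(1, S + 1)):
--         valid_sets = 0
--         for i in range(S - s + 1):
--             if is_valid(signs[i:i+s]):
--                 valid_sets += 1
--         if valid_sets > 0:
--             return s, valid_sets
--     return -1, -1
-- ===== SOURCE B (Python) =====
-- def _max_run(first, rest):
--     """Longest L such that [first] + rest[:L-1] admits (M, N) covering every sign.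
--
--     Tracks the only two viable scenarios incrementally:
--       - M fixed to first's M, N forced by the first non-matching sign;
--       - N fixed to first's N, M forced by the first non-matching sign.
--     """
--     a, b, c = first[0], first[1], first[2]
--     m0, n0 = a + b, a - c
--     alive_m, forced_n = True, None
--     alive_n, forced_m = True, None
--     run = 1
--     for row in rest:
--         a, b, c = row[0], row[1], row[2]
--         m, n = a + b, a - c
--         if alive_m and m != m0:
--             if forced_n is None:
--                 forced_n = n
--             elif n != forced_n:
--                 alive_m = False
--         if alive_n and n != n0:
--             if forced_m is None:
--                 forced_m = m
--             elif m != forced_m: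
--                 alive_n = False
--         if not (alive_m or alive_n):
--             break
--         run += 1
--     return run
--
--
-- def find_valid_sets(S, signs):
--     """O(S^2): per start, grow the window while a shared (M, N) pair still exists."""
--     if S <= 0:
--         return -1, -1
--     rows = signs[:S]
--     runs = []
--     while rows:
--         runs.append(_max_run(rows[0], rows[1:]))
--         rows = rows[1:]
--     best = max(runs)
--     return best, runs.count(best)
-- ===== Notes on version B (the rewrite author's own statement) =====
-- stated objective: faster
-- what changed: Instead of testing every window of every size with a multi-pass filter check (O(S^3)), B computes for each start the maximal valid run in one incremental pass that tracks the two viable (M,N) scenarios as constant-size state, then takes max and count of these run lengths (O(S^2)). Pre_ excludes inputs where some of the first S signs has fewer than 3 fields (A may raise or silently ignore missing fields) and inputs with S > len(signs), where A counts clipped slices as if they had the nominal size s.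
-- outside the precondition, e.g. on find_valid_sets(1, [[0, 0]]): A returns (1, 1), B raises IndexError; on find_valid_sets(2, [[1, 2, 3]]): A returns (2, 1), B returns (1, 1)
import Mathlib
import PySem

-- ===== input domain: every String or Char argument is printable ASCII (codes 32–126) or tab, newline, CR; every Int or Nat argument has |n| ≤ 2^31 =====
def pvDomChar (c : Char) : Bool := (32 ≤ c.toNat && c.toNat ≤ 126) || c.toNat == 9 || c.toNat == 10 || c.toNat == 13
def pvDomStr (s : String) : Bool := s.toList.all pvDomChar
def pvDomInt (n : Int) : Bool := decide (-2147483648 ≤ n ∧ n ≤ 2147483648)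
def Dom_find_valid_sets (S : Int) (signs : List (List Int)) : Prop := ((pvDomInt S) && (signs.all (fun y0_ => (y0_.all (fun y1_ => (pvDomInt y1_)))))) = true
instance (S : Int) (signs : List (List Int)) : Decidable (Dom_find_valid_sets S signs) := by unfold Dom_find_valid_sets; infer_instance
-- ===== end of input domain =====

-- B replaces A's test-every-window-of-every-size scan (O(S^3)) by one incremental maximal-run
-- pass per start position (O(S^2)); equivalence of the RETURN VALUE is proved on Pre_.

-- ===== PORT A =====
def ivSum (sign : List Int) : Int := PySem.List.pyGetD sign 0 0 + PySem.List.pyGetD sign 1 0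
def ivDiff (sign : List Int) : Int := PySem.List.pyGetD sign 0 0 - PySem.List.pyGetD sign 2 0

def is_valid (signs : List (List Int)) : Bool :=
  let M := ivSum (PySem.List.pyGetD signs 0 [])
  let o1 := signs.filter (fun sign => ivSum sign != M)
  if o1.isEmpty then true
  else
    let N := ivDiff (PySem.List.pyGetD o1 0 [])
    let o2 := o1.filter (fun sign => ivDiff sign != N)
    if o2.isEmpty then true
    else
      let N' := ivDiff (PySem.List.pyGetD signs 0 [])
      let o3 := signs.filter (fun sign => ivDiff sign != N')
      if o3.isEmpty then true
      else
        let M' := ivSum (PySem.List.pyGetD o3 0 [])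
        let o4 := o3.filter (fun sign => ivSum sign != M')
        o4.isEmpty

def countWindows (signs : List (List Int)) (S s : Int) : Int :=
  (PySem.List.pyRange 0 (S - s + 1) 1).foldl
    (fun acc i => if is_valid (PySem.List.slice signs (some i) (some (i + s))) then acc + 1 else acc) 0

-- `for s in reversed(range(1, S + 1))`: range is a lazy iterator, so the loop is a countdown on s
def goA (signs : List (List Int)) (S : Int) (s : Int) : Int × Int :=
  if 1 ≤ s then
    let c := countWindows signs S s
    if c > 0 then (s, c) else goA signs S (s - 1)
  else (-1, -1)
termination_by s.toNat
decreasing_by omega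

def find_valid_sets (S : Int) (signs : List (List Int)) : Int × Int :=
  goA signs S S

-- ===== PORT B =====
def rowSum (row : List Int) : Int := PySem.List.pyGetD row 0 0 + PySem.List.pyGetD row 1 0
def rowDiff (row : List Int) : Int := PySem.List.pyGetD row 0 0 - PySem.List.pyGetD row 2 0

-- one `if alive and key != key0:` block of _max_run, acting on its (alive, forced) pair
def runStep (key0 key forced : Int) (st : Bool × Option Int) : Bool × Option Int :=
  if st.1 && (key != key0) then
    match st.2 with
    | none => (st.1, some forced)
    | some v => if forced != v then (false, st.2) else st
  else st

def runLoop (m0 n0 : Int) : List (List Int) → (Bool × Option Int) → (Bool × Option Int) → Int → Int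
  | [], _, _, run => run
  | row :: rest, stM, stN, run =>
    let m := rowSum row
    let n := rowDiff row
    let stM' := runStep m0 m n stM
    let stN' := runStep n0 n m stN
    if !(stM'.1 || stN'.1) then run
    else runLoop m0 n0 rest stM' stN' (run + 1)

def maxRun (first : List Int) (rest : List (List Int)) : Int :=
  runLoop (rowSum first) (rowDiff first) rest (true, none) (true, none) 1

def runsOf : List (List Int) → List Int
  | [] => []
  | x :: r => maxRun x r :: runsOf r

def find_valid_sets_alt (S : Int) (signs : List (List Int)) : Int × Int :=
  if S ≤ 0 then (-1, -1)
  else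
    let rows := PySem.List.slice signs none (some S)
    let runs := runsOf rows
    let best := (PySem.List.max? runs (fun x => x)).getD 0
    (best, (runs.count best : Int))

-- ===== PRECONDITION & SPEC =====
-- Pre_ excludes inputs where some of the first S signs has fewer than 3 fields (A may raise
-- IndexError or silently ignore the missing fields) and inputs with S > len(signs), on which A
-- counts clipped/empty slices as windows of the nominal size s (or raises on the empty slice).
def Pre_find_valid_sets (S : Int) (signs : List (List Int)) : Prop :=
  S ≤ signs.length ∧ ∀ sign ∈ signs.take S.toNat, 3 ≤ sign.length
instance (S : Int) (signs : List (List Int)) : Decidable (Pre_find_valid_sets S signs) := by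
  unfold Pre_find_valid_sets; infer_instance

def pvWitness_find_valid_sets : Int × List (List Int) := (3, [[1, 2, 3], [2, 1, 4], [0, 0, 0]])

def Spec_find_valid_sets (S : Int) (signs : List (List Int)) (out : Int × Int) : Prop := out = find_valid_sets_alt S signs
instance (S : Int) (signs : List (List Int)) (out : Int × Int) : Decidable (Spec_find_valid_sets S signs out) := by unfold Spec_find_valid_sets; infer_instance

-- ===== CLAIM (what is proved, stated in full; the proofs are below) =====
def Claim_equal_find_valid_sets : Prop := ∀ (S : Int) (signs : List (List Int)), Dom_find_valid_sets S signs → Pre_find_valid_sets S signs → Spec_find_valid_sets S signs (find_valid_sets S signs)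


-- ===== LEMMAS AND PROOFS =====

@[simp] lemma rowSum_eq (x : List Int) : rowSum x = ivSum x := rfl
@[simp] lemma rowDiff_eq (x : List Int) : rowDiff x = ivDiff x := rfl

-- `alive` component of the incremental scenario: the signs violating the fixed key all force the
-- same secondary value (the one of the first violator)
def chainOk (f : List Int → Int) : List (List Int) → Bool
  | [] => true
  | y :: ys => ys.all (fun s => f s == f y)

-- the exact state _max_run's (alive, forced) pair holds after scanning p, expressed in closed form
def stGen (key f : List Int → Int) (k0 : Int) (p : List (List Int)) : Bool × Option Int :=
  (chainOk f (p.filter (fun s => key s != k0)), (p.filter (fun s => key s != k0)).head?.map f)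

-- window-tail validity: some scenario is still alive
def okW (m0 n0 : Int) (p : List (List Int)) : Bool :=
  (stGen ivSum ivDiff m0 p).1 || (stGen ivDiff ivSum n0 p).1

-- number of further rows the run absorbs after prefix p
def G (m0 n0 : Int) : List (List Int) → List (List Int) → Int
  | _, [] => 0
  | p, row :: rest => if okW m0 n0 (p ++ [row]) then 1 + G m0 n0 (p ++ [row]) rest else 0

lemma filter_ne_self (f : List Int → Int) (c : Int) (x : List Int) (h : f x = c)
    (l : List (List Int)) :
    (x :: l).filter (fun s => f s != c) = l.filter (fun s => f s != c) := by
  simp [h]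

lemma filter_ne_isEmpty (f : List Int → Int) (c : Int) (l : List (List Int)) :
    (l.filter (fun s => f s != c)).isEmpty = l.all (fun s => f s == c) := by
  induction l with
  | nil => rfl
  | cons a l ih =>
    by_cases hh : f a = c
    · simp [hh, ih]
    · simp [hh]

lemma is_valid_cons (x : List Int) (r : List (List Int)) :
    is_valid (x :: r) = okW (ivSum x) (ivDiff x) r := by
  unfold is_valid okW stGen
  simp only [PySem.List.pyGetD_zero_cons]
  rw [filter_ne_self ivSum (ivSum x) x rfl r]
  cases hf1 : r.filter (fun s => ivSum s != ivSum x) with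
  | nil => simp [chainOk]
  | cons y ys =>
    simp only [PySem.List.pyGetD_zero_cons, List.isEmpty_cons]
    rw [filter_ne_self ivDiff (ivDiff y) y rfl ys, filter_ne_isEmpty]
    by_cases hall : ys.all (fun s => ivDiff s == ivDiff y) = true
    · simp [chainOk, hall]
    · simp only [chainOk, hall, Bool.false_or, if_false, Bool.false_eq_true]
      rw [filter_ne_self ivDiff (ivDiff x) x rfl r]
      cases hf2 : r.filter (fun s => ivDiff s != ivDiff x) with
      | nil => simp
      | cons z zs =>
        simp only [PySem.List.pyGetD_zero_cons, List.isEmpty_cons]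
        rw [filter_ne_self ivSum (ivSum z) z rfl zs, filter_ne_isEmpty]
        simp

lemma runStep_stGen (key f : List Int → Int) (k0 : Int) (p : List (List Int)) (row : List Int) :
    runStep k0 (key row) (f row) (stGen key f k0 p) = stGen key f k0 (p ++ [row]) := by
  unfold runStep stGen
  simp only [List.filter_append]
  by_cases h : key row = k0
  · have hrow : (List.filter (fun s => key s != k0) [row]) = [] := by simp [h]
    simp [hrow, h]
  · have hrow : (List.filter (fun s => key s != k0) [row]) = [row] := by simp [h]
    cases hf : p.filter (fun s => key s != k0) with
    | nil => simp [hrow, chainOk, h]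
    | cons y ys =>
      simp only [hrow, chainOk]
      by_cases halive : ys.all (fun s => f s == f y) = true
      · by_cases heq : f row = f y <;>
          simp [halive, heq, h, List.all_append]
      · simp [Bool.eq_false_iff.mpr halive, List.all_append]

lemma runLoop_eq_G (m0 n0 : Int) :
    ∀ (rest p : List (List Int)) (run : Int),
      runLoop m0 n0 rest (stGen ivSum ivDiff m0 p) (stGen ivDiff ivSum n0 p) run
        = run + G m0 n0 p rest := by
  intro rest
  induction rest with
  | nil => intro p run; simp [runLoop, G]
  | cons row rest ih =>
    intro p run
    rw [runLoop, G]
    simp only [rowSum_eq, rowDiff_eq, runStep_stGen]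
    by_cases hok : okW m0 n0 (p ++ [row]) = true
    · have hb : ((stGen ivSum ivDiff m0 (p ++ [row])).1 || (stGen ivDiff ivSum n0 (p ++ [row])).1) = true := hok
      simp only [hb, hok, Bool.not_true, Bool.false_eq_true, if_false, if_true]
      rw [ih (p ++ [row]) (run + 1)]
      ring
    · have hok' : okW m0 n0 (p ++ [row]) = false := by
        exact Bool.eq_false_iff.mpr hok
      have hb : ((stGen ivSum ivDiff m0 (p ++ [row])).1 || (stGen ivDiff ivSum n0 (p ++ [row])).1) = false := hok'
      simp [hb, hok']

lemma G_nonneg (m0 n0 : Int) : ∀ (rest p : List (List Int)), 0 ≤ G m0 n0 p rest := by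
  intro rest
  induction rest with
  | nil => intro p; simp [G]
  | cons row rest ih =>
    intro p
    rw [G]
    split
    · have := ih (p ++ [row]); omega
    · omega

lemma G_le (m0 n0 : Int) : ∀ (rest p : List (List Int)), G m0 n0 p rest ≤ rest.length := by
  intro rest
  induction rest with
  | nil => intro p; simp [G]
  | cons row rest ih =>
    intro p
    rw [G]
    split
    · have := ih (p ++ [row]); simp only [List.length_cons]; push_cast; omega
    · simp only [List.length_cons]; push_cast; omega

lemma chainOk_append_false (f : List Int → Int) (l t : List (List Int))
    (h : chainOk f l = false) : chainOk f (l ++ t) = false := by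
  cases l with
  | nil => simp [chainOk] at h
  | cons y ys =>
    simp only [List.cons_append, chainOk, List.all_append] at h ⊢
    simp [h]

lemma okW_append_false (m0 n0 : Int) (p t : List (List Int)) (h : okW m0 n0 p = false) :
    okW m0 n0 (p ++ t) = false := by
  unfold okW stGen at h ⊢
  simp only [Bool.or_eq_false_iff] at h
  obtain ⟨h1, h2⟩ := h
  simp only [List.filter_append]
  simp [chainOk_append_false _ _ _ h1, chainOk_append_false _ _ _ h2]

lemma le_G_iff (m0 n0 : Int) :
    ∀ (rest p : List (List Int)) (k : Nat), okW m0 n0 p = true →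
      (((k : Int) ≤ G m0 n0 p rest) ↔ (k ≤ rest.length ∧ okW m0 n0 (p ++ rest.take k) = true)) := by
  intro rest
  induction rest with
  | nil =>
    intro p k hp
    simp only [G, List.take_nil, List.append_nil, List.length_nil, hp, and_true]
    omega
  | cons row rest ih =>
    intro p k hp
    rw [G]
    by_cases hok : okW m0 n0 (p ++ [row]) = true
    · rw [if_pos hok]
      cases k with
      | zero =>
        have hG := G_nonneg m0 n0 rest (p ++ [row])
        simp only [Nat.cast_zero, List.take_zero, List.append_nil, hp, and_true, List.length_cons]
        constructor
        · intro _; omega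
        · intro _; omega
      | succ k' =>
        have h' := ih (p ++ [row]) k' hok
        have hli : (p ++ [row]) ++ rest.take k' = p ++ (row :: rest.take k') := by simp
        rw [hli] at h'
        simp only [List.take_succ_cons, List.length_cons]
        constructor
        · intro hk
          have hk' : (k' : Int) ≤ G m0 n0 (p ++ [row]) rest := by push_cast at hk ⊢; omega
          obtain ⟨ha, hb⟩ := h'.mp hk'
          exact ⟨by omega, hb⟩
        · rintro ⟨ha, hb⟩
          have hk' : (k' : Int) ≤ G m0 n0 (p ++ [row]) rest := h'.mpr ⟨by omega, hb⟩
          push_cast at hk' ⊢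
          omega
    · rw [if_neg hok]
      have hok' : okW m0 n0 (p ++ [row]) = false := Bool.eq_false_iff.mpr hok
      cases k with
      | zero =>
        simp [hp]
      | succ k' =>
        have hfalse : okW m0 n0 (p ++ (row :: rest.take k')) = false := by
          have := okW_append_false m0 n0 (p ++ [row]) (rest.take k') hok'
          simpa using this
        simp only [List.take_succ_cons, List.length_cons, hfalse]
        constructor
        · intro hk; omega
        · rintro ⟨-, hb⟩; cases hb

lemma maxRun_eq (x : List Int) (rest : List (List Int)) :
    maxRun x rest = 1 + G (ivSum x) (ivDiff x) [] rest := by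
  unfold maxRun
  rw [rowSum_eq, rowDiff_eq]
  have h := runLoop_eq_G (ivSum x) (ivDiff x) rest [] 1
  have h0M : stGen ivSum ivDiff (ivSum x) [] = (true, none) := rfl
  have h0N : stGen ivDiff ivSum (ivDiff x) [] = (true, none) := rfl
  rw [h0M, h0N] at h
  exact h

lemma one_le_maxRun (x : List Int) (rest : List (List Int)) : 1 ≤ maxRun x rest := by
  rw [maxRun_eq]
  have := G_nonneg (ivSum x) (ivDiff x) rest []
  omega

lemma maxRun_le (x : List Int) (rest : List (List Int)) :
    maxRun x rest ≤ (rest.length : Int) + 1 := by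
  rw [maxRun_eq]
  have := G_le (ivSum x) (ivDiff x) rest []
  omega

lemma window_iff (x : List Int) (rest : List (List Int)) (s : Nat) (hs : 1 ≤ s)
    (hle : s ≤ rest.length + 1) :
    (is_valid (x :: rest.take (s - 1)) = true) ↔ ((s : Int) ≤ maxRun x rest) := by
  rw [is_valid_cons, maxRun_eq]
  have h0 : okW (ivSum x) (ivDiff x) [] = true := rfl
  have h := le_G_iff (ivSum x) (ivDiff x) rest [] (s - 1) h0
  simp only [List.nil_append] at h
  constructor
  · intro hv
    have hk := h.mpr ⟨by omega, hv⟩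
    push_cast at hk ⊢
    omega
  · intro hk
    have h1 : ((s - 1 : Nat) : Int) ≤ G (ivSum x) (ivDiff x) [] rest := by omega
    exact (h.mp h1).2

lemma runsOf_length (rows : List (List Int)) : (runsOf rows).length = rows.length := by
  induction rows with
  | nil => rfl
  | cons x r ih => simp [runsOf, ih]

lemma mem_runsOf_le (rows : List (List Int)) : ∀ L ∈ runsOf rows, L ≤ (rows.length : Int) := by
  induction rows with
  | nil => simp [runsOf]
  | cons x r ih =>
    intro L hL
    simp only [runsOf, List.mem_cons] at hL
    rcases hL with rfl | hL
    · have := maxRun_le x r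
      simp only [List.length_cons]
      push_cast
      omega
    · have := ih L hL
      simp only [List.length_cons]
      push_cast
      omega

lemma mem_runsOf_pos (rows : List (List Int)) : ∀ L ∈ runsOf rows, 1 ≤ L := by
  induction rows with
  | nil => simp [runsOf]
  | cons x r ih =>
    intro L hL
    simp only [runsOf, List.mem_cons] at hL
    rcases hL with rfl | hL
    · exact one_le_maxRun x r
    · exact ih L hL

lemma countP_windows (rows : List (List Int)) :
    ∀ (s : Nat), 1 ≤ s → s ≤ rows.length →
      (List.range (rows.length - s + 1)).countP (fun i => is_valid ((rows.drop i).take s))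
        = (runsOf rows).countP (fun L => decide ((s : Int) ≤ L)) := by
  induction rows with
  | nil =>
    intro s h1 h2
    simp at h2
    omega
  | cons x r ih =>
    intro s h1 h2
    obtain ⟨s', rfl⟩ : ∃ s', s = s' + 1 := ⟨s - 1, by omega⟩
    have hhead : is_valid ((x :: r).take (s' + 1)) = decide (((s' + 1 : Nat) : Int) ≤ maxRun x r) := by
      have h := window_iff x r (s' + 1) (by omega) (by simp only [List.length_cons] at h2; omega)
      simp only [Nat.add_sub_cancel] at h
      rw [List.take_succ_cons]
      apply Bool.eq_iff_iff.mpr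
      simp only [decide_eq_true_eq]
      exact h
    by_cases hsr : s' + 1 ≤ r.length
    · have hlen : (x :: r).length - (s' + 1) + 1 = (r.length - (s' + 1) + 1) + 1 := by
        simp only [List.length_cons]; omega
      rw [hlen, List.range_succ_eq_map, List.countP_cons, List.countP_map]
      have htail :
          (List.range (r.length - (s' + 1) + 1)).countP
              ((fun i => is_valid ((List.drop i (x :: r)).take (s' + 1))) ∘ Nat.succ)
            = (List.range (r.length - (s' + 1) + 1)).countP
              (fun i => is_valid ((r.drop i).take (s' + 1))) := by
        apply List.countP_congr
        intro i _
        simp [Function.comp]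
      rw [htail, ih (s' + 1) (by omega) hsr]
      simp only [runsOf, List.countP_cons, List.drop_zero, hhead]
    · have hs' : s' = r.length := by simp only [List.length_cons] at h2; omega
      have hlen : (x :: r).length - (s' + 1) + 1 = 1 := by
        simp only [List.length_cons]; omega
      rw [hlen]
      have hr1 : List.range 1 = [0] := rfl
      rw [hr1]
      have htail0 : (runsOf r).countP (fun L => decide (((s' + 1 : Nat) : Int) ≤ L)) = 0 := by
        rw [List.countP_eq_zero]
        intro L hL
        have := mem_runsOf_le r L hL
        simp only [decide_eq_true_eq]
        omega
      simp only [runsOf, List.countP_cons, List.countP_nil, List.drop_zero, hhead, htail0]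

lemma countWindows_char (signs : List (List Int)) (S : Int) (hS : S ≤ signs.length)
    (s : Nat) (h1 : 1 ≤ s) (h2 : (s : Int) ≤ S) :
    countWindows signs S (s : Int)
      = (((runsOf (signs.take S.toNat)).countP (fun L => decide ((s : Int) ≤ L)) : Nat) : Int) := by
  unfold countWindows
  rw [PySem.List.foldl_if_add_one]
  simp only [zero_add]
  set n := S.toNat with hn
  have hsn : s ≤ n := by omega
  have hnl : n ≤ signs.length := by omega
  have hb : S - (s : Int) + 1 = ((n - s + 1 : Nat) : Int) := by omega
  rw [hb, PySem.List.pyRange_one]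
  have hbn : (((n - s + 1 : Nat) : Int) - 0).toNat = n - s + 1 := by omega
  rw [hbn, List.countP_map]
  have hrl : (signs.take n).length = n := by simp [List.length_take]; omega
  have hcongr :
      (List.range (n - s + 1)).countP
          ((fun i => is_valid (PySem.List.slice signs (some i) (some (i + (s : Int))))) ∘ (fun k => (0 : Int) + (k : Nat)))
        = (List.range (n - s + 1)).countP
          (fun i => is_valid (((signs.take n).drop i).take s)) := by
    apply List.countP_congr
    intro i hi
    have hi' : i ≤ n - s := by simp only [List.mem_range] at hi; omega
    have hslice : PySem.List.slice signs (some ((i : Nat) : Int)) (some (((i : Nat) : Int) + (s : Int)))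
        = (signs.drop i).take s := PySem.List.slice_natCast_add signs i s
    have hsame : (signs.drop i).take s = ((signs.take n).drop i).take s := by
      rw [List.drop_take, List.take_take]
      congr 1
      omega
    simp only [Function.comp, zero_add, hslice, hsame]
  rw [hcongr]
  have := countP_windows (signs.take n) s h1 (by omega)
  rw [hrl] at this
  rw [this]


-- ===== VERDICT (by name: the statement is the Claim_ definition above) =====
theorem find_valid_sets_spec : Claim_equal_find_valid_sets := by
  intro S signs _hdom hpre
  obtain ⟨hS_len, -⟩ := hpre
  unfold Spec_find_valid_sets find_valid_sets find_valid_sets_alt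
  by_cases hS : S ≤ 0
  · rw [if_pos hS, goA, if_neg (by omega)]
  · rw [if_neg hS]
    have hS' : 0 < S := by omega
    clear hS
    have hS := hS'
    have hSn : ((S.toNat : Nat) : Int) = S := by omega
    have hlen : S.toNat ≤ signs.length := by omega
    have hrl : (signs.take S.toNat).length = S.toNat := by
      simp [List.length_take]
      omega
    have hrunslen : (runsOf (signs.take S.toNat)).length = S.toNat := by
      rw [runsOf_length, hrl]
    have hne : runsOf (signs.take S.toNat) ≠ [] := by
      intro h
      rw [h] at hrunslen
      simp at hrunslen
      omega
    obtain ⟨b, hb⟩ : ∃ b, PySem.List.max? (runsOf (signs.take S.toNat)) (fun x => x) = some b := by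
      cases hmax : PySem.List.max? (runsOf (signs.take S.toNat)) (fun x => x) with
      | none => exact absurd ((PySem.List.max?_eq_none_iff _ _).mp hmax) hne
      | some b => exact ⟨b, rfl⟩
    have hbmem : b ∈ runsOf (signs.take S.toNat) := PySem.List.max?_mem hb
    have hble : ∀ L ∈ runsOf (signs.take S.toNat), L ≤ b := PySem.List.max?_isMax hb
    have hbpos : 1 ≤ b := mem_runsOf_pos _ b hbmem
    have hbS : b ≤ S := by
      have := mem_runsOf_le _ b hbmem
      rw [hrl] at this
      omega
    have hslice : PySem.List.slice signs none (some S) = signs.take S.toNat :=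
      PySem.List.slice_to signs (by omega)
    simp only [hslice, hb, Option.getD_some]
    have hcw : ∀ s : Nat, 1 ≤ s → (s : Int) ≤ S →
        countWindows signs S (s : Int)
          = (((runsOf (signs.take S.toNat)).countP (fun L => decide ((s : Int) ≤ L)) : Nat) : Int) :=
      fun s hs1 hs2 => countWindows_char signs S hS_len s hs1 hs2
    have hcnt : (runsOf (signs.take S.toNat)).countP (fun L => decide (b ≤ L))
        = (runsOf (signs.take S.toNat)).count b := by
      have hfun : ∀ L ∈ runsOf (signs.take S.toNat), (decide (b ≤ L) = true ↔ (L == b) = true) := by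
        intro L hL
        have h1 := hble L hL
        by_cases he : L = b
        · simp [he]
        · have h2 : ¬ b ≤ L := by omega
          simp [he, h2]
      rw [List.countP_congr hfun]
      rfl
    have key : ∀ k : Nat, ∀ s : Int, s = b + k → s ≤ S →
        goA signs S s = (b, ((runsOf (signs.take S.toNat)).count b : Int)) := by
      intro k
      induction k with
      | zero =>
        intro s hs hsS
        simp only [Nat.cast_zero, add_zero] at hs
        rw [goA, if_pos (by omega)]
        have hsnat : ((s.toNat : Nat) : Int) = s := by omega
        have hc := hcw s.toNat (by omega) (by omega)
        rw [hsnat] at hc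
        have hceq : (runsOf (signs.take S.toNat)).countP (fun L => decide (s ≤ L))
            = (runsOf (signs.take S.toNat)).count b := by
          rw [hs]
          exact hcnt
        rw [hc, hceq]
        have hpos : 0 < (runsOf (signs.take S.toNat)).count b := List.count_pos_iff.mpr hbmem
        rw [if_pos (by exact_mod_cast hpos), hs]
      | succ k ih =>
        intro s hs hsS
        rw [goA, if_pos (by omega)]
        have hsnat : ((s.toNat : Nat) : Int) = s := by omega
        have hc := hcw s.toNat (by omega) (by omega)
        rw [hsnat] at hc
        have hzero : (runsOf (signs.take S.toNat)).countP (fun L => decide (s ≤ L)) = 0 := by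
          rw [List.countP_eq_zero]
          intro L hL
          have := hble L hL
          simp only [decide_eq_true_eq]
          omega
        rw [hc, hzero]
        rw [if_neg (by norm_num)]
        exact ih (s - 1) (by omega) (by omega)
    exact key (S - b).toNat S (by omega) le_rfl
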